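-- pv_equiv track=rewrite | github.com/Wulfic/Cicada3301 | Tools/attack_pages_31_54.py | word_to_indices
-- ===== SOURCE A (Python) =====
-- GP_LATIN_TO_INDEX = {
--     'F': 0, 'U': 1, 'TH': 2, 'O': 3, 'R': 4, 'C': 5, 'K': 5,
--     'G': 6, 'W': 7, 'H': 8, 'N': 9, 'I': 10, 'J': 11,
--     'EO': 12, 'P': 13, 'X': 14, 'S': 15, 'T': 16, 'B': 17,
--     'E': 18, 'M': 19, 'L': 20, 'NG': 21, 'OE': 22, 'D': 23,
--     'A': 24, 'AE': 25, 'Y': 26, 'IA': 27, 'EA': 28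
-- }
--
-- def word_to_indices(word):
--     """Convert a word to cipher indices"""
--     indices = []
--     i = 0
--     word = word.upper()
--
--     while i < len(word):
--         # Try two-letter combos first
--         if i < len(word) - 1:
--             two_char = word[i:i+2]
--             if two_char in GP_LATIN_TO_INDEX:
--                 indices.append(GP_LATIN_TO_INDEX[two_char])
--                 i += 2
--                 continue
--
--         # Single character
--         one_char = word[i]
--         if one_char in GP_LATIN_TO_INDEX:
--             indices.append(GP_LATIN_TO_INDEX[one_char])
--         i += 1
--
--     return indices
-- ===== SOURCE B (Python) =====
-- GP_LATIN_TO_INDEX = {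
--     'F': 0, 'U': 1, 'TH': 2, 'O': 3, 'R': 4, 'C': 5, 'K': 5,
--     'G': 6, 'W': 7, 'H': 8, 'N': 9, 'I': 10, 'J': 11,
--     'EO': 12, 'P': 13, 'X': 14, 'S': 15, 'T': 16, 'B': 17,
--     'E': 18, 'M': 19, 'L': 20, 'NG': 21, 'OE': 22, 'D': 23,
--     'A': 24, 'AE': 25, 'Y': 26, 'IA': 27, 'EA': 28
-- }
--
-- # Token table: all rune names ordered longest-first (stable), so a generic
-- # ordered-alternation scan gives maximal munch without hard-coding lengths.
-- TOKENS = sorted(GP_LATIN_TO_INDEX, key=len, reverse=True)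
--
-- def word_to_indices(word):
--     """Convert a word to cipher indices"""
--     word = word.upper()
--     out = []
--     i = 0
--     n = len(word)
--     while i < n:
--         for t in TOKENS:
--             if word.startswith(t, i):
--                 out.append(GP_LATIN_TO_INDEX[t])
--                 i += len(t)
--                 break
--         else:
--             i += 1
--     return out
-- ===== Notes on version B (the rewrite author's own statement) =====
-- stated objective: idiomatic
-- what changed: Replaces the hard-coded two-char-slice-then-single-char lookahead with a generic table-driven scanner: the rune names are sorted longest-first once and the scan tries this ordered alternation with startswith at each position (maximal munch), so the per-length branching disappears.
import Mathlib
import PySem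

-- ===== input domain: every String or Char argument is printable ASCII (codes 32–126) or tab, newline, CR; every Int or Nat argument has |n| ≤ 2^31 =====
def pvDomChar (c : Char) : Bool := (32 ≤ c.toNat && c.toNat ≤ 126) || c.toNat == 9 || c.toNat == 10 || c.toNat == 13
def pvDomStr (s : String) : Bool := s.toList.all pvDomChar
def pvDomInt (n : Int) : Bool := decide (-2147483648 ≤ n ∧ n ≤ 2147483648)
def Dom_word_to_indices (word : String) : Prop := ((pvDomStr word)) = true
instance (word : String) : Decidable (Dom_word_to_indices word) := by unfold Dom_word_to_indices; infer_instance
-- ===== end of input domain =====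

-- B replaces A's hard-coded two-char-then-one-char lookahead by a generic table-driven
-- ordered-alternation scanner (rune names sorted longest-first, tried with startswith);
-- objective: idiomatic. Equal return value on every input.

-- ===== PORT A =====
def gpDict : PySem.Dict String Int := PySem.Dict.mk
  [("F",0),("U",1),("TH",2),("O",3),("R",4),("C",5),("K",5),
   ("G",6),("W",7),("H",8),("N",9),("I",10),("J",11),
   ("EO",12),("P",13),("X",14),("S",15),("T",16),("B",17),
   ("E",18),("M",19),("L",20),("NG",21),("OE",22),("D",23),
   ("A",24),("AE",25),("Y",26),("IA",27),("EA",28)]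

-- A's while loop over the position i, as structural recursion on the remaining characters.
def goA : List Char → List Int
  | [] => []
  -- i < len(word) - 1 : try the two-letter combo word[i:i+2] first
  | c1 :: c2 :: rest2 =>
    match gpDict.get? (String.ofList [c1, c2]) with
    | some v => v :: goA rest2
    | none =>
      match gpDict.get? (String.ofList [c1]) with
      | some v => v :: goA (c2 :: rest2)
      | none => goA (c2 :: rest2)
  | [c1] =>
    match gpDict.get? (String.ofList [c1]) with
    | some v => v :: goA []
    | none => goA []

def word_to_indices (word : String) : List Int := goA (PySem.Str.upper word).toList

-- ===== PORT B =====
-- TOKENS = sorted(GP_LATIN_TO_INDEX, key=len, reverse=True)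
def tokensB : List String := PySem.List.sorted gpDict.keys (fun t => (PySem.Str.len t : Int)) true

-- every token is nonempty (used for termination of goB)
theorem tokensB_len_pos : ∀ t ∈ tokensB, 1 ≤ t.length := by decide

-- B's while loop: at each position try the alternatives in order (word.startswith(t, i)),
-- consume the matched token, otherwise skip one character.
def goB : List Char → List Int
  | [] => []
  | c :: rest =>
    match h : tokensB.find? (fun t => t.toList.isPrefixOf (c :: rest)) with
    | some t => gpDict.getD t 0 :: goB ((c :: rest).drop t.toList.length)  -- t is always a key of gpDict
    | none => goB rest
termination_by cs => cs.length
decreasing_by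
  · have ht : t ∈ tokensB := List.mem_of_find?_eq_some h
    have := tokensB_len_pos t ht
    simp [List.length_drop]
    omega
  · simp

def word_to_indices_alt (word : String) : List Int := goB (PySem.Str.upper word).toList

-- ===== PRECONDITION & SPEC =====
def Spec_word_to_indices (word : String) (out : List Int) : Prop := out = word_to_indices_alt word
instance (word : String) (out : List Int) : Decidable (Spec_word_to_indices word out) := by unfold Spec_word_to_indices; infer_instance

-- ===== CLAIM (what is proved, stated in full; the proofs are below) =====
def Claim_equal_word_to_indices : Prop := ∀ (word : String), Dom_word_to_indices word → Spec_word_to_indices word (word_to_indices word)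

-- ===== LEMMAS AND PROOFS =====

theorem tokensB_split :
    tokensB = ["TH","EO","NG","OE","AE","IA","EA"] ++
      ["F","U","O","R","C","K","G","W","H","N","I","J","P","X","S","T","B","E","M","L","D","A","Y"] := by
  decide

theorem twoL_len : ∀ t ∈ (["TH","EO","NG","OE","AE","IA","EA"] : List String), t.toList.length = 2 := by decide

theorem oneL_len : ∀ t ∈ (["F","U","O","R","C","K","G","W","H","N","I","J","P","X","S","T","B","E","M","L","D","A","Y"] : List String), t.toList.length = 1 := by decide

theorem keys2_mem_twoL : ∀ k ∈ gpDict.keys, k.toList.length = 2 → k ∈ (["TH","EO","NG","OE","AE","IA","EA"] : List String) := by decide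

theorem keys1_mem_oneL : ∀ k ∈ gpDict.keys, k.toList.length = 1 → k ∈ (["F","U","O","R","C","K","G","W","H","N","I","J","P","X","S","T","B","E","M","L","D","A","Y"] : List String) := by decide

theorem twoL_isSome : ∀ t ∈ (["TH","EO","NG","OE","AE","IA","EA"] : List String), (gpDict.get? t).isSome = true := by decide

theorem oneL_isSome : ∀ t ∈ (["F","U","O","R","C","K","G","W","H","N","I","J","P","X","S","T","B","E","M","L","D","A","Y"] : List String), (gpDict.get? t).isSome = true := by decide

-- find? on a list where the predicate holds exactly at s
theorem find?_of_pred_iff {l : List String} {p : String → Bool} {s : String}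
    (hiff : ∀ t ∈ l, (p t = true ↔ t = s)) (hmem : s ∈ l) : l.find? p = some s := by
  induction l with
  | nil => cases hmem
  | cons a l ih =>
    rcases Bool.eq_false_or_eq_true (p a) with ha | ha
    · have he : a = s := (hiff a List.mem_cons_self).mp ha
      subst he
      simp [ha]
    · have ha' : ¬ (p a = true) := by simp [ha]
      have has : a ≠ s := fun he => ha' ((hiff a List.mem_cons_self).mpr he)
      have hsl : s ∈ l := by
        cases hmem with
        | head => exact absurd rfl has
        | tail _ h => exact h
      simp only [List.find?_cons, ha]
      exact ih (fun t ht => hiff t (List.mem_cons_of_mem _ ht)) hsl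

theorem prefix2_iff (t : String) (h2 : t.toList.length = 2) (c1 c2 : Char) (rest : List Char) :
    (t.toList.isPrefixOf (c1 :: c2 :: rest) = true) ↔ t = String.ofList [c1, c2] := by
  rw [String.ext_iff]
  match hl : t.toList with
  | [a, b] => simp [List.isPrefixOf, and_comm]
  | [] | [a] | a :: b :: c :: l => simp [hl] at h2

theorem prefix2_single (t : String) (h2 : t.toList.length = 2) (c1 : Char) :
    t.toList.isPrefixOf [c1] = false := by
  match hl : t.toList with
  | [a, b] => simp [List.isPrefixOf]
  | [] | [a] | a :: b :: c :: l => simp [hl] at h2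

theorem prefix1_iff (t : String) (h1 : t.toList.length = 1) (c1 : Char) (rest : List Char) :
    (t.toList.isPrefixOf (c1 :: rest) = true) ↔ t = String.ofList [c1] := by
  rw [String.ext_iff]
  match hl : t.toList with
  | [a] => simp [List.isPrefixOf]
  | [] | a :: b :: l => simp [hl] at h1

theorem mem_keys_of_get?_some {k : String} {v : Int} (h : gpDict.get? k = some v) :
    k ∈ gpDict.keys := by
  have hc : gpDict.contains k = true := by
    rw [PySem.Dict.contains_eq_isSome_get?, h]
    rfl
  rw [PySem.Dict.contains_eq_decide_mem_keys] at hc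
  exact of_decide_eq_true hc

theorem goB_cons (c : Char) (rest : List Char) :
    goB (c :: rest) =
      match tokensB.find? (fun t => t.toList.isPrefixOf (c :: rest)) with
      | some t => gpDict.getD t 0 :: goB ((c :: rest).drop t.toList.length)
      | none => goB rest := by
  rw [goB]
  split
  next t h => rw [h]
  next h => rw [h]

theorem goA_eq_goB : ∀ n cs, cs.length ≤ n → goA cs = goB cs := by
  intro n
  induction n with
  | zero =>
    intro cs h
    have h0 : cs = [] := List.eq_nil_of_length_eq_zero (Nat.le_zero.mp h)
    subst h0
    simp [goA, goB]
  | succ n ih =>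
    intro cs hlen
    match cs with
    | [] => simp [goA, goB]
    | [c1] =>
      have hfind2 : (["TH","EO","NG","OE","AE","IA","EA"] : List String).find?
          (fun t => t.toList.isPrefixOf [c1]) = none :=
        List.find?_eq_none.mpr (fun t ht => by simp [prefix2_single t (twoL_len t ht) c1])
      rw [goB_cons, tokensB_split, List.find?_append, hfind2]
      cases h1 : gpDict.get? (String.ofList [c1]) with
      | some v =>
        have hone : String.ofList [c1] ∈
            (["F","U","O","R","C","K","G","W","H","N","I","J","P","X","S","T","B","E","M","L","D","A","Y"] : List String) :=
          keys1_mem_oneL _ (mem_keys_of_get?_some h1) (by simp)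
        have hf : (["F","U","O","R","C","K","G","W","H","N","I","J","P","X","S","T","B","E","M","L","D","A","Y"] : List String).find?
            (fun t => t.toList.isPrefixOf [c1]) = some (String.ofList [c1]) :=
          find?_of_pred_iff (fun t ht => prefix1_iff t (oneL_len t ht) c1 []) hone
        rw [hf]
        simp [goA, goB, h1, PySem.Dict.getD_eq_get?_getD]
      | none =>
        have hf : (["F","U","O","R","C","K","G","W","H","N","I","J","P","X","S","T","B","E","M","L","D","A","Y"] : List String).find?
            (fun t => t.toList.isPrefixOf [c1]) = none :=
          List.find?_eq_none.mpr (fun t ht hp => by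
            have he := (prefix1_iff t (oneL_len t ht) c1 []).mp hp
            have hs := oneL_isSome t ht
            rw [he, h1] at hs
            simp at hs)
        rw [hf]
        simp [goA, goB, h1]
    | c1 :: c2 :: rest =>
      have hr1 : (c2 :: rest).length ≤ n := by simp at hlen ⊢; omega
      have hr2 : rest.length ≤ n := by simp at hlen ⊢; omega
      cases h2 : gpDict.get? (String.ofList [c1, c2]) with
      | some v =>
        have htwo : String.ofList [c1, c2] ∈ (["TH","EO","NG","OE","AE","IA","EA"] : List String) :=
          keys2_mem_twoL _ (mem_keys_of_get?_some h2) (by simp)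
        have hf2 : (["TH","EO","NG","OE","AE","IA","EA"] : List String).find?
            (fun t => t.toList.isPrefixOf (c1 :: c2 :: rest)) = some (String.ofList [c1, c2]) :=
          find?_of_pred_iff (fun t ht => prefix2_iff t (twoL_len t ht) c1 c2 rest) htwo
        rw [goB_cons, tokensB_split, List.find?_append, hf2]
        simp [goA, h2, PySem.Dict.getD_eq_get?_getD, ih rest hr2]
      | none =>
        have hf2 : (["TH","EO","NG","OE","AE","IA","EA"] : List String).find?
            (fun t => t.toList.isPrefixOf (c1 :: c2 :: rest)) = none :=
          List.find?_eq_none.mpr (fun t ht hp => by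
            have he := (prefix2_iff t (twoL_len t ht) c1 c2 rest).mp hp
            have hs := twoL_isSome t ht
            rw [he, h2] at hs
            simp at hs)
        rw [goB_cons, tokensB_split, List.find?_append, hf2]
        cases h1 : gpDict.get? (String.ofList [c1]) with
        | some v =>
          have hone : String.ofList [c1] ∈
              (["F","U","O","R","C","K","G","W","H","N","I","J","P","X","S","T","B","E","M","L","D","A","Y"] : List String) :=
            keys1_mem_oneL _ (mem_keys_of_get?_some h1) (by simp)
          have hf : (["F","U","O","R","C","K","G","W","H","N","I","J","P","X","S","T","B","E","M","L","D","A","Y"] : List String).find?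
              (fun t => t.toList.isPrefixOf (c1 :: c2 :: rest)) = some (String.ofList [c1]) :=
            find?_of_pred_iff (fun t ht => prefix1_iff t (oneL_len t ht) c1 (c2 :: rest)) hone
          rw [hf]
          simp [goA, h2, h1, PySem.Dict.getD_eq_get?_getD, ih (c2 :: rest) hr1]
        | none =>
          have hf : (["F","U","O","R","C","K","G","W","H","N","I","J","P","X","S","T","B","E","M","L","D","A","Y"] : List String).find?
              (fun t => t.toList.isPrefixOf (c1 :: c2 :: rest)) = none :=
            List.find?_eq_none.mpr (fun t ht hp => by
              have he := (prefix1_iff t (oneL_len t ht) c1 (c2 :: rest)).mp hp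
              have hs := oneL_isSome t ht
              rw [he, h1] at hs
              simp at hs)
          rw [hf]
          simp [goA, h2, h1, ih (c2 :: rest) hr1]

-- ===== VERDICT (by name: the statement is the Claim_ definition above) =====
theorem word_to_indices_spec : Claim_equal_word_to_indices := by
  intro word _
  unfold Spec_word_to_indices word_to_indices word_to_indices_alt
  exact goA_eq_goB _ _ le_rfl
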